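-- pv_equiv track=rewrite | github.com/DelroyGayle/VariousAlgorithms | generate_base_numbers/gen_octal_numbers.py | generate_octal_numbers
-- ===== SOURCE A (Python) =====
-- def generate_octal_numbers(n):
--     """
--     Proof of concept:
--     Generate 'n' octal numbers using a 'queue'
--     That is, generate the first 'n' octal numbers
--     The algorithm must take in an integer 'n' as input and return
--     a list of the first 'n' octal numbers.
--     """
--
--     result = []
--     if n <= 0:
--         return result
--     # if n == 1:
--     #     return ['1']
--
--     queue = ['1']
--     queue = [str(suffix) for suffix in range(1, 8)]
--     while True:
--         current = queue.pop(0)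
--         result.append(current)
--         queue += ([current + str(suffix) for suffix in range(0, 8)])
--
--         n -= 1
--         if n == 0:
--             break
--
--     return result
-- ===== SOURCE B (Python) =====
-- def generate_octal_numbers(n):
--     result = []
--     for i in range(1, n + 1):
--         digits = []
--         while i > 0:
--             digits.append(str(i % 8))
--             i //= 8
--         result.append(''.join(reversed(digits)))
--     return result
-- ===== Notes on version B (the rewrite author's own statement) =====
-- stated objective: faster
-- what changed: Replaced A's BFS prefix-queue generation (list.pop(0) on a queue that grows to ~7n strings) with an independent base-8 digit-extraction conversion of each i in 1..n.
import Mathlib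
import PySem

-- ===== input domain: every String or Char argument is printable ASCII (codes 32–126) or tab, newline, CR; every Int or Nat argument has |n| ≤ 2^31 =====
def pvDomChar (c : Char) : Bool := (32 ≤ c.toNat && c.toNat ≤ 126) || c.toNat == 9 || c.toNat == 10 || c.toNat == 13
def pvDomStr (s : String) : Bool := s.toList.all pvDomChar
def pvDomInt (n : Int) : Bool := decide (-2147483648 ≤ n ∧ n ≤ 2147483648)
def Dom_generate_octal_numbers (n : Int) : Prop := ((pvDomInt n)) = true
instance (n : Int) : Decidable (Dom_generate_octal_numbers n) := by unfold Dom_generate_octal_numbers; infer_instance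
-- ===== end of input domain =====

-- B replaces A's quadratic BFS prefix queue (list.pop(0) on a growing queue) by an independent
-- per-number base-8 digit-extraction conversion of each i in 1..n.

-- ===== PORT A =====
-- queue += [current + str(suffix) for suffix in range(0, 8)]
def genOctA_step (current : String) : List String :=
  (PySem.List.pyRange 0 8 1).map (fun suffix => current ++ PySem.Int.toStr suffix)

-- the 'while True' loop: runs exactly n times (n ≥ 1 on entry).  'queue.pop(0)' on an empty
-- queue would raise IndexError in Python; that branch is unreachable (the queue always grows).
def genOctA_loop : Nat → List String → List String → List String
  | 0, _, result => result
  | fuel + 1, queue, result =>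
    match queue with
    | [] => result
    | current :: rest =>
        genOctA_loop fuel (rest ++ genOctA_step current) (result ++ [current])

def generate_octal_numbers (n : Int) : List String :=
  if n ≤ 0 then []
  else genOctA_loop n.toNat
        ((PySem.List.pyRange 1 8 1).map (fun suffix => PySem.Int.toStr suffix)) []

-- ===== PORT B =====
-- the 'while i > 0: digits.append(str(i % 8)); i //= 8' loop of Source B
def genOctB_digits (i : Int) : List String :=
  if 0 < i then
    PySem.Int.toStr (PySem.Int.mod i 8) :: genOctB_digits (PySem.Int.floordiv i 8)
  else []
termination_by i.toNat
decreasing_by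
  have h8 : PySem.Int.floordiv i 8 = i / 8 := PySem.Int.floordiv_eq_ediv_of_pos (by norm_num)
  rw [h8]; omega

def generate_octal_numbers_alt (n : Int) : List String :=
  (PySem.List.pyRange 1 (n + 1) 1).map
    (fun i => PySem.Str.join "" ((genOctB_digits i).reverse))

-- ===== PRECONDITION & SPEC =====
def Spec_generate_octal_numbers (n : Int) (out : List String) : Prop := out = generate_octal_numbers_alt n
instance (n : Int) (out : List String) : Decidable (Spec_generate_octal_numbers n out) := by unfold Spec_generate_octal_numbers; infer_instance

-- ===== CLAIM (what is proved, stated in full; the proofs are below) =====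
def Claim_equal_generate_octal_numbers : Prop := ∀ (n : Int), Dom_generate_octal_numbers n → Spec_generate_octal_numbers n (generate_octal_numbers n)

-- ===== LEMMAS AND PROOFS =====

-- the octal string of k (no leading zeros), the common value both programs produce
def octS (k : Nat) : String :=
  if k < 8 then PySem.Int.toStr (k : Int)
  else octS (k / 8) ++ PySem.Int.toStr ((k % 8 : Nat) : Int)
decreasing_by exact Nat.div_lt_self (by omega) (by omega)

lemma interc_nil (l : List (List Char)) : List.intercalate ([] : List Char) l = l.flatten := by
  simp [List.intercalate]
  induction l with
  | nil => rfl
  | cons a t ih => cases t <;> simp_all [List.intersperse]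

lemma join_empty_append (l : List String) (x : String) :
    PySem.Str.join "" (l ++ [x]) = PySem.Str.join "" l ++ x := by
  apply String.toList_inj.mp
  simp [PySem.Str.toList_join, PySem.Chars.join, interc_nil]

lemma octS_step (k d : Nat) (hk : 1 ≤ k) (hd : d < 8) :
    octS k ++ PySem.Int.toStr (d : Int) = octS (8 * k + d) := by
  conv_rhs => rw [octS]
  have h8 : ¬ (8 * k + d < 8) := by omega
  have hdiv : (8 * k + d) / 8 = k := by omega
  have hmod : (8 * k + d) % 8 = d := by omega
  simp [h8, hdiv, hmod]

lemma step_eq (k : Nat) (hk : 1 ≤ k) :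
    genOctA_step (octS k) = (List.range' (8 * k) 8).map octS := by
  have h : PySem.List.pyRange 0 8 1 = [0, 1, 2, 3, 4, 5, 6, 7] := by decide
  simp only [genOctA_step, h, List.range', List.map_cons, List.map_nil]
  refine List.ext_getElem (by simp) ?_
  intro i h1 h2
  have hi : i < 8 := by simpa using h1
  interval_cases i <;>
    simpa using octS_step k _ hk (by omega)

lemma loop_inv (f : Nat) : ∀ (k : Nat) (res : List String), 1 ≤ k →
    genOctA_loop f ((List.range' k (7 * k)).map octS) res
      = res ++ (List.range' k f).map octS := by
  induction f with
  | zero => simp [genOctA_loop]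
  | succ f ih =>
    intro k res hk
    have h7 : 7 * k = (7 * k - 1) + 1 := by omega
    rw [h7, List.range'_succ, List.map_cons]
    show genOctA_loop (f + 1) _ _ = _
    rw [genOctA_loop, step_eq k hk, ← List.map_append]
    have hap : List.range' (k + 1) (7 * k - 1) ++ List.range' (8 * k) 8
        = List.range' (k + 1) (7 * (k + 1)) := by
      have h8 : 8 * k = (k + 1) + (7 * k - 1) := by omega
      rw [h8, List.range'_append_1]
      congr 1; omega
    rw [hap, ih (k + 1) (res ++ [octS k]) (by omega), List.range'_succ, List.map_cons]
    simp

lemma digits_eq (k : Nat) (hk : 1 ≤ k) :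
    PySem.Str.join "" ((genOctB_digits (k : Int)).reverse) = octS k := by
  induction k using Nat.strong_induction_on with
  | _ k ih =>
    rw [genOctB_digits]
    have hpos : (0 : Int) < (k : Int) := by exact_mod_cast hk
    rw [if_pos hpos]
    have hm : PySem.Int.mod (k : Int) 8 = ((k % 8 : Nat) : Int) := by
      rw [show (8 : Int) = ((8 : Nat) : Int) by norm_num, PySem.Int.mod_natCast]
    have hf : PySem.Int.floordiv (k : Int) 8 = ((k / 8 : Nat) : Int) := by
      rw [show (8 : Int) = ((8 : Nat) : Int) by norm_num, PySem.Int.floordiv_natCast]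
    rw [hm, hf]
    by_cases h8 : k < 8
    · have hz : (k / 8 : Nat) = 0 := by omega
      rw [hz]
      rw [genOctB_digits]
      have hmod : k % 8 = k := by omega
      simp only [hmod]
      conv_rhs => rw [octS]
      rw [if_pos h8]
      apply String.toList_inj.mp
      simp [PySem.Str.join, PySem.Int.toList_toStr]
    · rw [List.reverse_cons, join_empty_append,
        ih (k / 8) (Nat.div_lt_self (by omega) (by omega)) (by omega)]
      conv_rhs => rw [octS]
      rw [if_neg h8]

lemma initial_queue_eq :
    (PySem.List.pyRange 1 8 1).map (fun suffix => PySem.Int.toStr suffix)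
      = (List.range' 1 7).map octS := by
  have h : PySem.List.pyRange 1 8 1 = [1, 2, 3, 4, 5, 6, 7] := by decide
  simp only [h, List.range', List.map_cons, List.map_nil]
  refine List.ext_getElem (by simp) ?_
  intro i h1 h2
  have hi : i < 7 := by simpa using h1
  interval_cases i <;> simp [octS]

-- ===== VERDICT (by name: the statement is the Claim_ definition above) =====
theorem generate_octal_numbers_spec : Claim_equal_generate_octal_numbers := by
  intro n _
  unfold Spec_generate_octal_numbers generate_octal_numbers generate_octal_numbers_alt
  by_cases hn : n ≤ 0
  · rw [if_pos hn, PySem.List.pyRange_one_eq_nil (by omega)]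
    simp
  · rw [if_neg hn, initial_queue_eq]
    have h71 : (7 : Nat) = 7 * 1 := by norm_num
    rw [h71, loop_inv n.toNat 1 [] (le_refl 1), List.nil_append]
    rw [PySem.List.pyRange_one]
    have hb : ((n + 1 - 1).toNat) = n.toNat := by omega
    rw [hb, List.map_map]
    have hr : List.range' 1 n.toNat = (List.range n.toNat).map (fun k => 1 + k) := by
      rw [List.range'_eq_map_range]
    rw [hr, List.map_map]
    refine List.map_congr_left ?_
    intro k _
    have hcast : (1 : Int) + (k : Int) = ((1 + k : Nat) : Int) := by push_cast; ring
    simp only [Function.comp]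
    rw [hcast, digits_eq (1 + k) (by omega)]
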